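-- pv_equiv track=rewrite | github.com/AntonioCarta/ThreeRNN | src/parse.py | clean_tok
-- ===== SOURCE A (Python) =====
-- def clean_tok(t):
-- 	ret = t
--
-- 	if any(c.isalpha() for c in t):
-- 		ret = ''
-- 		for c in t:
-- 			if c.isalpha() or c == "'":
-- 				ret+=c
-- 	return ret
-- ===== SOURCE B (Python) =====
-- def clean_tok(t):
--     buf = []
--     has_alpha = False
--     for c in t:
--         if c.isalpha():
--             has_alpha = True
--             buf.append(c)
--         elif c == "'":
--             buf.append(c)
--     return ''.join(buf) if has_alpha else t
-- ===== Notes on version B (the rewrite author's own statement) =====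
-- stated objective: simpler
-- what changed: Fuses A's separate any()-scan and filter-loop into one pass that maintains a has_alpha flag and a buffer, returning the buffer only if a letter was seen.
import Mathlib
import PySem

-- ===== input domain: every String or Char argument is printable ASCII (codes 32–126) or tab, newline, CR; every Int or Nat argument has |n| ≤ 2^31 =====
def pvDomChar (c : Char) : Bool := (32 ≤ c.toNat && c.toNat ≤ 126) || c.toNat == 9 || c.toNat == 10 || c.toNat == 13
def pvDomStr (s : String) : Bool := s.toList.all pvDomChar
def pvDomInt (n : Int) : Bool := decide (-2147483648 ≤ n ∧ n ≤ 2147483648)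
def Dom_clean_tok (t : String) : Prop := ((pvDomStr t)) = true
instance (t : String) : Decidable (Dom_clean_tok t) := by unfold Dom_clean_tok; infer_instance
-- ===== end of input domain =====

-- B fuses A's any()-scan and filter-loop into one pass with a has_alpha flag (objective: simpler).

-- ===== PORT A =====
def clean_tok (t : String) : String :=
  if t.toList.any (fun c => PySem.Chars.isalpha c) then
    String.ofList (t.toList.foldl
      (fun ret c => if PySem.Chars.isalpha c || c == '\'' then ret ++ [c] else ret) [])
  else t

-- ===== PORT B =====
def clean_tok_alt (t : String) : String :=
  let st := t.toList.foldl
    (fun (p : List Char × Bool) c =>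
      if PySem.Chars.isalpha c then (p.1 ++ [c], true)
      else if c == '\'' then (p.1 ++ [c], p.2) else p)
    ([], false)
  if st.2 then String.ofList st.1 else t

-- ===== PRECONDITION & SPEC =====
def Spec_clean_tok (t : String) (out : String) : Prop := out = clean_tok_alt t
instance (t : String) (out : String) : Decidable (Spec_clean_tok t out) := by unfold Spec_clean_tok; infer_instance

-- ===== CLAIM (what is proved, stated in full; the proofs are below) =====
def Claim_equal_clean_tok : Prop := ∀ (t : String), Dom_clean_tok t → Spec_clean_tok t (clean_tok t)

-- ===== LEMMAS AND PROOFS =====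

-- B's fused fold equals (the accumulator ++ the kept characters, flag OR any-letter).
theorem pvFold_clean_tok (cs : List Char) (acc : List Char) (b : Bool) :
    cs.foldl
      (fun (p : List Char × Bool) c =>
        if PySem.Chars.isalpha c then (p.1 ++ [c], true)
        else if c == '\'' then (p.1 ++ [c], p.2) else p)
      (acc, b)
    = (acc ++ cs.filter (fun c => PySem.Chars.isalpha c || c == '\''),
       b || cs.any (fun c => PySem.Chars.isalpha c)) := by
  induction cs generalizing acc b with
  | nil => simp
  | cons c cs ih =>
    rw [List.foldl_cons]
    by_cases ha : PySem.Chars.isalpha c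
    · rw [if_pos ha, ih]; simp [ha]
    · rw [if_neg ha]
      by_cases hq : (c == '\'') = true
      · rw [if_pos hq, ih]; simp [ha, hq]
      · rw [if_neg hq, ih]; simp [ha, hq]

-- ===== VERDICT (by name: the statement is the Claim_ definition above) =====
theorem clean_tok_spec : Claim_equal_clean_tok := by
  intro t _
  unfold Spec_clean_tok clean_tok clean_tok_alt
  rw [pvFold_clean_tok, PySem.List.foldl_append_if_eq_filter]
  by_cases h : t.toList.any (fun c => PySem.Chars.isalpha c) <;> simp [h]
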